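-- pv_equiv track=rewrite | github.com/ltl-uva/build_what_i_mean | pragmatic_builder/building_task.py | _categorize_trials
-- ===== SOURCE A (Python) =====
-- from typing import Any, Dict, List
--
-- def _categorize_trials(data: List[Dict[str, str]]) -> Dict[str, List[str]]:
--     """Categorize trials by type (fully_spec, color_under, number_under)."""
--     categories = {
--         'fully_spec': [],
--         'color_under': [],
--         'number_under': []
--     }
--
--     seen_base_numbers = set()
--
--     for row in data:
--         trial_num = row['trialNumber']
--         # Extract base number (remove 'a' or 'b' suffix)
--         if trial_num[-1] in ['a', 'b']:
--             base_num = trial_num[:-1]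
--         else:
--             base_num = trial_num
--
--         # Only process each base number once
--         if base_num in seen_base_numbers:
--             continue
--         seen_base_numbers.add(base_num)
--
--         # Categorize based on trial type in the row
--         trial_type = row.get('trialType', '')
--         if trial_type == 'fully_spec':
--             categories['fully_spec'].append(base_num)
--         elif trial_type == 'color_under':
--             categories['color_under'].append(base_num)
--         elif trial_type == 'number_under':
--             categories['number_under'].append(base_num)
--
--     return categories
-- ===== SOURCE B (Python) =====
-- def _categorize_trials(data):
--     """Two-pass: map each base number to its first-seen trial type, then bucket."""
--     first_type = {}
--     for row in data:
--         trial_num = row['trialNumber']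
--         base_num = trial_num[:-1] if trial_num[-1] in ('a', 'b') else trial_num
--         if base_num not in first_type:
--             first_type[base_num] = row.get('trialType', '')
--     categories = {'fully_spec': [], 'color_under': [], 'number_under': []}
--     for base_num, trial_type in first_type.items():
--         if trial_type in categories:
--             categories[trial_type].append(base_num)
--     return categories
-- ===== Notes on version B (the rewrite author's own statement) =====
-- stated objective: alternative
-- what changed: A's single loop that deduplicates and categorizes at once is replaced by two passes: first build an insertion-ordered map from base number to its first-seen trial type, then bucket the map's items into the three categories.
import Mathlib
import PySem

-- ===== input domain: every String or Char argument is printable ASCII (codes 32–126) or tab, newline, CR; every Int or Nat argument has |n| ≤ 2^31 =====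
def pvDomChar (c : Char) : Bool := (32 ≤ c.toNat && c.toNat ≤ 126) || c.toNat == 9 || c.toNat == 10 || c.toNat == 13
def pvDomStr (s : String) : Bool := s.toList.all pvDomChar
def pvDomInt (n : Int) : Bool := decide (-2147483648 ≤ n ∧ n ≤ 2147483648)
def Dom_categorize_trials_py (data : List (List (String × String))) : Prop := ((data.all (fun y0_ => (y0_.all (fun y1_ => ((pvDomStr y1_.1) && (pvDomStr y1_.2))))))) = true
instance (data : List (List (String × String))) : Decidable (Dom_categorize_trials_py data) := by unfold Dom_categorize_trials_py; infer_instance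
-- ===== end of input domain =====

-- B replaces A's single dedup-and-categorize loop by two passes (first-occurrence type map, then bucketing over its items); objective: alternative decomposition, same cost.

-- shared row accessors (the same lines of Python occur verbatim in A and B):
-- row['trialNumber'] then base_num = trial_num[:-1] if last char is 'a'/'b'; none = KeyError/IndexError (excluded by Pre_)
def pvBase? (row : List (String × String)) : Option String :=
  match (PySem.Dict.mk row).get? "trialNumber" with
  | none => none
  | some tn =>
    match PySem.Str.pyGet? tn (-1) with
    | none => none
    | some c => some (if c == 'a' || c == 'b' then PySem.Str.slice tn none (some (-1)) else tn)

-- row.get('trialType', '')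
def pvType (row : List (String × String)) : String :=
  ((PySem.Dict.mk row).get? "trialType").getD ""

-- categories = {'fully_spec': [], 'color_under': [], 'number_under': []}
def pvCatsInit : PySem.Dict String (List String) :=
  ((PySem.Dict.empty.insert "fully_spec" []).insert "color_under" []).insert "number_under" []

-- ===== PORT A =====
-- one loop: skip seen base numbers, else add to seen and append into the matching category
def pvStepA (st : PySem.Dict String (List String) × PySem.Set String)
    (row : List (String × String)) : PySem.Dict String (List String) × PySem.Set String :=
  match pvBase? row with
  | none => st
  | some base =>
    if PySem.Set.contains st.2 base then st
    else
      let seen' := PySem.Set.add st.2 base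
      let tt := pvType row
      let cats' :=
        if tt = "fully_spec" then st.1.modify "fully_spec" [] (· ++ [base])
        else if tt = "color_under" then st.1.modify "color_under" [] (· ++ [base])
        else if tt = "number_under" then st.1.modify "number_under" [] (· ++ [base])
        else st.1
      (cats', seen')

def categorize_trials_py (data : List (List (String × String))) : List (String × List String) :=
  (data.foldl pvStepA (pvCatsInit, PySem.Set.empty)).1.items

-- ===== PORT B =====
-- pass 1: first_type[base_num] set only on first occurrence
def pvFirstStep (m : PySem.Dict String String) (row : List (String × String)) : PySem.Dict String String :=
  match pvBase? row with
  | none => m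
  | some base => if m.contains base then m else m.insert base (pvType row)

-- pass 2: for (base, type) in first_type.items(): if type in categories: append
def pvBucket (cats : PySem.Dict String (List String)) (p : String × String) :
    PySem.Dict String (List String) :=
  if cats.contains p.2 then cats.modify p.2 [] (· ++ [p.1]) else cats

def categorize_trials_py_alt (data : List (List (String × String))) : List (String × List String) :=
  ((data.foldl pvFirstStep PySem.Dict.empty).items.foldl pvBucket pvCatsInit).items

-- ===== PRECONDITION & SPEC =====
-- Pre_ excludes exactly the inputs on which the Python A raises: a row without a 'trialNumber'
-- key (KeyError) or with an empty 'trialNumber' value (IndexError on trial_num[-1]).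
def Pre_categorize_trials_py (data : List (List (String × String))) : Prop :=
  (data.all (fun row =>
    match row.find? (fun p => p.1 == "trialNumber") with
    | some p => !(p.2 == "")
    | none => false)) = true
instance (data : List (List (String × String))) : Decidable (Pre_categorize_trials_py data) := by
  unfold Pre_categorize_trials_py; infer_instance

def pvWitness_categorize_trials_py : (List (List (String × String))) :=
  [[("trialNumber", "1a"), ("trialType", "fully_spec")], [("trialNumber", "2"), ("trialType", "color_under")]]

def Spec_categorize_trials_py (data : List (List (String × String))) (out : List (String × List String)) : Prop := out = categorize_trials_py_alt data
instance (data : List (List (String × String))) (out : List (String × List String)) : Decidable (Spec_categorize_trials_py data out) := by unfold Spec_categorize_trials_py; infer_instance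

-- ===== CLAIM (what is proved, stated in full; the proofs are below) =====
def Claim_equal_categorize_trials_py : Prop := ∀ (data : List (List (String × String))), Dom_categorize_trials_py data → Pre_categorize_trials_py data → Spec_categorize_trials_py data (categorize_trials_py data)

-- ===== LEMMAS AND PROOFS =====

-- the witness satisfies Dom and Pre
theorem pvWitness_ok :
    Dom_categorize_trials_py pvWitness_categorize_trials_py ∧
    Pre_categorize_trials_py pvWitness_categorize_trials_py := by decide

-- a key-set invariant of the categories dict
def pvCatsKeys (cats : PySem.Dict String (List String)) : Prop :=
  ∀ t, cats.contains t = true ↔ (t = "fully_spec" ∨ t = "color_under" ∨ t = "number_under")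

theorem pvCatsKeys_init : pvCatsKeys pvCatsInit := by
  intro t
  simp [pvCatsInit, PySem.Dict.contains_insert, PySem.Dict.contains_empty]
  tauto

theorem pvCatsKeys_modify (cats : PySem.Dict String (List String)) (k : String)
    (f : List String → List String) (h : pvCatsKeys cats) (hk : cats.contains k = true) :
    pvCatsKeys (cats.modify k [] f) := by
  intro t
  rw [PySem.Dict.contains_modify]
  by_cases htk : t = k
  · subst htk
    simp only [beq_self_eq_true, Bool.true_or]
    exact iff_of_true trivial ((h t).mp hk)
  · have hf : (t == k) = false := beq_eq_false_iff_ne.mpr htk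
    rw [hf, Bool.false_or]
    exact h t

-- A's per-row categorisation step equals B's bucketing step, given the key invariant
theorem pvCat_eq_bucket (cats : PySem.Dict String (List String)) (h : pvCatsKeys cats)
    (base tt : String) :
    (if tt = "fully_spec" then cats.modify "fully_spec" [] (· ++ [base])
     else if tt = "color_under" then cats.modify "color_under" [] (· ++ [base])
     else if tt = "number_under" then cats.modify "number_under" [] (· ++ [base])
     else cats) = pvBucket cats (base, tt) := by
  unfold pvBucket
  by_cases h1 : tt = "fully_spec"
  · subst h1; simp [(h _).mpr (Or.inl rfl)]
  · by_cases h2 : tt = "color_under"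
    · subst h2; simp [(h _).mpr (Or.inr (Or.inl rfl))]
    · by_cases h3 : tt = "number_under"
      · subst h3; simp [(h _).mpr (Or.inr (Or.inr rfl))]
      · have hct : cats.contains tt = false := by
          rcases hc : cats.contains tt with _ | _
          · rfl
          · rcases (h tt).mp hc with e | e | e <;> simp_all
        simp [h1, h2, h3, hct]

-- the bucketing step preserves the key invariant
theorem pvCatsKeys_bucket (cats : PySem.Dict String (List String)) (p : String × String)
    (h : pvCatsKeys cats) : pvCatsKeys (pvBucket cats p) := by
  unfold pvBucket
  split
  · exact pvCatsKeys_modify cats p.2 _ h (by assumption)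
  · exact h

-- B's first pass only ever appends items
theorem pvFirst_prefix (rs : List (List (String × String))) :
    ∀ m : PySem.Dict String String, ∃ ext, (rs.foldl pvFirstStep m).items = m.items ++ ext := by
  induction rs with
  | nil => intro m; exact ⟨[], by simp⟩
  | cons r rs ih =>
    intro m
    rcases hb : pvBase? r with _ | base
    · have e : pvFirstStep m r = m := by simp [pvFirstStep, hb]
      rw [List.foldl_cons, e]
      exact ih m
    · by_cases hc : m.contains base = true
      · have e : pvFirstStep m r = m := by simp [pvFirstStep, hb, hc]
        rw [List.foldl_cons, e]
        exact ih m
      · have hcf : m.contains base = false := Bool.eq_false_iff.mpr hc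
        have e : pvFirstStep m r = m.insert base (pvType r) := by simp [pvFirstStep, hb, hcf]
        rw [List.foldl_cons, e]
        obtain ⟨ext, hext⟩ := ih (m.insert base (pvType r))
        refine ⟨(base, pvType r) :: ext, ?_⟩
        rw [hext, PySem.Dict.items_insert_of_not_contains m (pvType r) hcf]
        simp

-- main invariant: running A's loop from (cats, seen) equals bucketing the NEW items of B's map
theorem pvMainInv (data : List (List (String × String))) :
    ∀ (cats : PySem.Dict String (List String)) (seen : PySem.Set String)
      (m : PySem.Dict String String),
      (∀ x, PySem.Set.contains seen x = m.contains x) → pvCatsKeys cats →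
      (data.foldl pvStepA (cats, seen)).1 =
        ((data.foldl pvFirstStep m).items.drop m.items.length).foldl pvBucket cats := by
  induction data with
  | nil => intro cats seen m _ _; simp
  | cons r rs ih =>
    intro cats seen m hseen hk
    rcases hb : pvBase? r with _ | base
    · have eA : pvStepA (cats, seen) r = (cats, seen) := by simp [pvStepA, hb]
      have eB : pvFirstStep m r = m := by simp [pvFirstStep, hb]
      rw [List.foldl_cons, List.foldl_cons, eA, eB]
      exact ih cats seen m hseen hk
    · by_cases hc : m.contains base = true
      · have hst : PySem.Set.contains seen base = true := by rw [hseen]; exact hc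
        have hmem : base ∈ seen := (PySem.Set.contains_iff seen base).mp hst
        have eA : pvStepA (cats, seen) r = (cats, seen) := by simp [pvStepA, hb, hmem]
        have eB : pvFirstStep m r = m := by simp [pvFirstStep, hb, hc]
        rw [List.foldl_cons, List.foldl_cons, eA, eB]
        exact ih cats seen m hseen hk
      · have hcf : m.contains base = false := Bool.eq_false_iff.mpr hc
        have hsf : PySem.Set.contains seen base = false := by rw [hseen]; exact hcf
        have hnmem : base ∉ seen := fun hm =>
          absurd ((PySem.Set.contains_iff seen base).mpr hm)
            (by rw [hsf]; exact Bool.false_ne_true)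
        have eA : pvStepA (cats, seen) r =
            ((if pvType r = "fully_spec" then cats.modify "fully_spec" [] (· ++ [base])
              else if pvType r = "color_under" then cats.modify "color_under" [] (· ++ [base])
              else if pvType r = "number_under" then cats.modify "number_under" [] (· ++ [base])
              else cats), PySem.Set.add seen base) := by
          simp [pvStepA, hb, hnmem]
        have eB : pvFirstStep m r = m.insert base (pvType r) := by
          simp [pvFirstStep, hb, hcf]
        rw [List.foldl_cons, List.foldl_cons, eA, eB]
        have hk' : pvCatsKeys (if pvType r = "fully_spec" then
              cats.modify "fully_spec" [] (· ++ [base])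
            else if pvType r = "color_under" then cats.modify "color_under" [] (· ++ [base])
            else if pvType r = "number_under" then cats.modify "number_under" [] (· ++ [base])
            else cats) := by
          rw [pvCat_eq_bucket cats hk base (pvType r)]
          exact pvCatsKeys_bucket cats (base, pvType r) hk
        have hseen' : ∀ x, PySem.Set.contains (PySem.Set.add seen base) x =
            (m.insert base (pvType r)).contains x := by
          intro x
          rw [PySem.Dict.contains_insert]
          rw [PySem.Set.add_of_not_mem hnmem, ← hseen x]
          by_cases hx : x = base
          · subst hx
            simp [PySem.Set.contains_eq_listContains]
          · simp [PySem.Set.contains_eq_listContains, hx]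
        rw [ih _ _ _ hseen' hk']
        obtain ⟨ext, hext⟩ := pvFirst_prefix rs (m.insert base (pvType r))
        rw [hext, PySem.Dict.items_insert_of_not_contains m (pvType r) hcf]
        have h1 : ((m.items ++ [(base, pvType r)]) ++ ext).drop
            (m.items ++ [(base, pvType r)]).length = ext := List.drop_left
        have h2 : ((m.items ++ [(base, pvType r)]) ++ ext).drop m.items.length =
            (base, pvType r) :: ext := by
          rw [List.append_assoc]
          exact List.drop_left
        rw [h1, h2, List.foldl_cons, pvCat_eq_bucket cats hk base (pvType r)]

-- ===== VERDICT (by name: the statement is the Claim_ definition above) =====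
theorem categorize_trials_py_spec : Claim_equal_categorize_trials_py := by
  intro data _ _
  unfold Spec_categorize_trials_py categorize_trials_py categorize_trials_py_alt
  have h := pvMainInv data pvCatsInit PySem.Set.empty PySem.Dict.empty
    (by intro x; simp [PySem.Set.contains_eq_listContains, PySem.Set.empty,
      PySem.Dict.contains_empty]) pvCatsKeys_init
  rw [h]
  simp [PySem.Dict.empty]
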